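-- pv_equiv track=rewrite | github.com/rossmassey/fetch-leetcode-problem | src/fetch_leetcode_problem/_func_parsing.py | _add_pass_to_functions
-- ===== SOURCE A (Python) =====
-- def _add_pass_to_functions(class_src: str) -> str:
--     """
--     Adds `pass` to each function in class source code to allow for ast parsing
--
--     Args:
--         class_src: source code of class
--
--     Returns: source code with `pass` added to each function
--     """
--     lines = class_src.split('\n')
--     modified_lines = []
--
--     for line in lines:
--         modified_lines.append(line)
--
--         if line.strip().startswith('def'):
--             # account for class offset
--             indent = 4 + len(line) - len(line.lstrip())
--             indented_pass = ' ' * indent + 'pass'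
--             modified_lines.append(indented_pass)
--
--     return '\n'.join(modified_lines)
-- ===== SOURCE B (Python) =====
-- import re
--
-- # One regex substitution over the whole source (MULTILINE): each line whose
-- # first non-whitespace characters are literally 'def' (no word boundary, to keep
-- # the original startswith semantics) gets a correspondingly indented 'pass'
-- # line appended after it.
-- _DEF_RE = re.compile(r'^([^\S\n]*)def.*$', re.MULTILINE)
--
--
-- def _add_pass_to_functions(class_src: str) -> str:
--     return _DEF_RE.sub(
--         lambda m: m.group(0) + '\n' + ' ' * (4 + len(m.group(1))) + 'pass',
--         class_src,
--     )
-- ===== Notes on version B (the rewrite author's own statement) =====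
-- stated objective: idiomatic
-- what changed: Replaces the split/append-loop/join over a line list by a single re.sub over the whole source with a MULTILINE pattern anchored at line start, inserting the indented pass in the replacement function.
import Mathlib
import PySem

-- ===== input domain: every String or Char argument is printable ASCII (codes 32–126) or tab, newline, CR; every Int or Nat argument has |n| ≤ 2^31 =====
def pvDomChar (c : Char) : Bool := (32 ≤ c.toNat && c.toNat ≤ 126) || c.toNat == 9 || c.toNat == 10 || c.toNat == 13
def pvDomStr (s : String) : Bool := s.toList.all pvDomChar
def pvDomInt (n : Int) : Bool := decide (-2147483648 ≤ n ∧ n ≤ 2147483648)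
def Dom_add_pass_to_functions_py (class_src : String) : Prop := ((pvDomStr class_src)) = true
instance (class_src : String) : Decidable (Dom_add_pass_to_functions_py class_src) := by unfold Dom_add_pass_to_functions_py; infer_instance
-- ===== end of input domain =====

-- B replaces A's split / append-loop / join by one multiline regex substitution (idiomatic, same cost).

-- ===== PORT A =====
-- A: split on '\n', loop appending each line plus an indented 'pass' after 'def' lines, join with '\n'.
def add_pass_to_functions_py (class_src : String) : String :=
  let lines := PySem.Chars.splitOn class_src.toList ['\n']
  let modified_lines := lines.foldl (fun acc line =>
    let acc := acc ++ [line]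
    if PySem.Chars.startswith (PySem.Chars.strip line) ['d', 'e', 'f'] then
      let indent : Int := 4 + (line.length : Int) - ((PySem.Chars.lstrip line).length : Int)
      acc ++ [List.replicate indent.toNat ' ' ++ ['p', 'a', 's', 's']]
    else acc) []
  String.ofList (PySem.Chars.join ['\n'] modified_lines)

-- ===== PORT B =====
-- B is re.sub(r'^([^\S\n]*)def.*$', repl, src, re.MULTILINE).  Ported by hand, exactly:
-- the regex class [^\S\n] is "Python whitespace except newline" (altWs below is exact there);
-- since '^' (MULTILINE) matches only at line starts, the class cannot cross '\n' and '.*$'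
-- consumes the rest of the line, the substitution acts independently on each '\n'-separated
-- line: a line matches iff its maximal leading [^\S\n]-run is followed by literal "def"
-- ('def' is not whitespace, so regex backtracking into the greedy run can never help),
-- and the whole matched line is replaced by itself ++ '\n' ++ (4+len(group 1)) spaces ++ "pass".
def altWs (c : Char) : Bool := PySem.Chars.isspace c && !(c == '\n')

def altSub (line : List Char) : List Char :=
  let ws := line.takeWhile altWs
  if ['d', 'e', 'f'].isPrefixOf (line.drop ws.length) then
    line ++ '\n' :: (List.replicate (4 + ws.length) ' ' ++ ['p', 'a', 's', 's'])
  else line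

def add_pass_to_functions_py_alt (class_src : String) : String :=
  String.ofList (PySem.Chars.join ['\n']
    ((PySem.Chars.splitOn class_src.toList ['\n']).map altSub))

-- ===== PRECONDITION & SPEC =====
def Spec_add_pass_to_functions_py (class_src : String) (out : String) : Prop := out = add_pass_to_functions_py_alt class_src
instance (class_src : String) (out : String) : Decidable (Spec_add_pass_to_functions_py class_src out) := by unfold Spec_add_pass_to_functions_py; infer_instance

-- ===== CLAIM (what is proved, stated in full; the proofs are below) =====
def Claim_equal_add_pass_to_functions_py : Prop := ∀ (class_src : String), Dom_add_pass_to_functions_py class_src → Spec_add_pass_to_functions_py class_src (add_pass_to_functions_py class_src)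

-- ===== LEMMAS AND PROOFS =====

-- A's per-line contribution to the joined list.
def fA (line : List Char) : List (List Char) :=
  if PySem.Chars.startswith (PySem.Chars.strip line) ['d', 'e', 'f'] then
    [line, List.replicate (4 + (line.length : Int) - ((PySem.Chars.lstrip line).length : Int)).toNat ' ' ++ ['p', 'a', 's', 's']]
  else [line]

theorem fA_ne_nil (line : List Char) : fA line ≠ [] := by
  unfold fA; split <;> simp

theorem foldlA_eq_flatMap : ∀ (lines : List (List Char)) (acc : List (List Char)),
    lines.foldl (fun acc line =>
      if PySem.Chars.startswith (PySem.Chars.strip line) ['d', 'e', 'f'] then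
        (acc ++ [line]) ++ [List.replicate (4 + (line.length : Int) - ((PySem.Chars.lstrip line).length : Int)).toNat ' ' ++ ['p', 'a', 's', 's']]
      else acc ++ [line]) acc
    = acc ++ lines.flatMap fA := by
  intro lines
  induction lines with
  | nil => intro acc; simp
  | cons l rest ih =>
    intro acc
    simp only [List.foldl_cons, List.flatMap_cons, ih]
    unfold fA
    split <;> simp

theorem dropWhile_congr' (p q : Char → Bool) :
    ∀ (l : List Char), (∀ x ∈ l, p x = q x) → l.dropWhile p = l.dropWhile q := by
  intro l
  induction l with
  | nil => intro _; rfl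
  | cons a l ih =>
    intro h
    have ha := h a (by simp)
    rw [List.dropWhile_cons, List.dropWhile_cons, ha]
    split
    · exact ih (fun x hx => h x (by simp [hx]))
    · rfl

theorem takeWhile_congr' (p q : Char → Bool) :
    ∀ (l : List Char), (∀ x ∈ l, p x = q x) → l.takeWhile p = l.takeWhile q := by
  intro l
  induction l with
  | nil => intro _; rfl
  | cons a l ih =>
    intro h
    have ha := h a (by simp)
    rw [List.takeWhile_cons, List.takeWhile_cons, ha]
    split
    · rw [ih (fun x hx => h x (by simp [hx]))]
    · rfl

theorem drop_length_takeWhile (p : Char → Bool) (l : List Char) :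
    l.drop (l.takeWhile p).length = l.dropWhile p := by
  calc l.drop (l.takeWhile p).length
      = (l.takeWhile p ++ l.dropWhile p).drop (l.takeWhile p).length := by
        rw [List.takeWhile_append_dropWhile]
    _ = l.dropWhile p := List.drop_left

-- rstrip gives a prefix of its argument.
theorem rstrip_prefix (x : List Char) : PySem.Chars.rstrip x <+: x := by
  unfold PySem.Chars.rstrip
  conv_rhs => rw [← List.reverse_reverse x]
  exact List.reverse_prefix.mpr (List.dropWhile_suffix _)

-- rstrip of a list starting with "def" still starts with "def".
theorem rstrip_def_prefix (t : List Char) :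
    ['d', 'e', 'f'] <+: PySem.Chars.rstrip (['d', 'e', 'f'] ++ t) := by
  unfold PySem.Chars.rstrip
  rw [List.reverse_append, List.dropWhile_append]
  split
  · decide
  · refine ⟨(t.reverse.dropWhile PySem.Chars.isspace).reverse, ?_⟩
    simp

-- the strip-then-startswith test equals regex-style "leading ws-run then literal def".
theorem cond_eq (l : List Char) (h : '\n' ∉ l) :
    PySem.Chars.startswith (PySem.Chars.strip l) ['d', 'e', 'f']
      = ['d', 'e', 'f'].isPrefixOf (l.drop (l.takeWhile altWs).length) := by
  have hdw : l.dropWhile altWs = l.dropWhile PySem.Chars.isspace := by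
    apply dropWhile_congr'
    intro c hc
    have hne : c ≠ '\n' := fun e => h (e ▸ hc)
    simp [altWs, hne]
  have htw : l.takeWhile altWs = l.takeWhile PySem.Chars.isspace := by
    apply takeWhile_congr'
    intro c hc
    have hne : c ≠ '\n' := fun e => h (e ▸ hc)
    simp [altWs, hne]
  have hdrop : l.drop (l.takeWhile altWs).length = l.dropWhile PySem.Chars.isspace := by
    rw [htw, drop_length_takeWhile]
  rw [hdrop]
  unfold PySem.Chars.startswith PySem.Chars.strip PySem.Chars.lstrip
  set y := l.dropWhile PySem.Chars.isspace with hy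
  rcases hp : ['d', 'e', 'f'].isPrefixOf y with _ | _
  · -- both sides false
    rw [Bool.eq_false_iff]
    intro hcon
    have h1 : ['d', 'e', 'f'] <+: PySem.Chars.rstrip y := List.isPrefixOf_iff_prefix.mp hcon
    have h2 : ['d', 'e', 'f'] <+: y := h1.trans (rstrip_prefix y)
    rw [← List.isPrefixOf_iff_prefix, hp] at h2
    exact Bool.false_ne_true h2
  · -- both sides true
    obtain ⟨t, ht⟩ := List.isPrefixOf_iff_prefix.mp hp
    rw [← ht]
    exact List.isPrefixOf_iff_prefix.mpr (rstrip_def_prefix t)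

-- A's indent arithmetic equals 4 + length of the leading ws-run.
theorem indent_eq (l : List Char) (h : '\n' ∉ l) :
    (4 + (l.length : Int) - ((PySem.Chars.lstrip l).length : Int)).toNat
      = 4 + (l.takeWhile altWs).length := by
  have htw : l.takeWhile altWs = l.takeWhile PySem.Chars.isspace := by
    apply takeWhile_congr'
    intro c hc
    have hne : c ≠ '\n' := fun e => h (e ▸ hc)
    simp [altWs, hne]
  have hsplit : (l.takeWhile PySem.Chars.isspace).length
      + (l.dropWhile PySem.Chars.isspace).length = l.length := by
    rw [← List.length_append, List.takeWhile_append_dropWhile]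
  unfold PySem.Chars.lstrip
  rw [htw]
  omega

-- joining A's per-line pieces gives B's per-line string.
theorem join_fA (l : List Char) (h : '\n' ∉ l) :
    PySem.Chars.join ['\n'] (fA l) = altSub l := by
  simp only [fA, altSub]
  rw [cond_eq l h]
  split
  · rw [PySem.Chars.join_cons_cons, PySem.Chars.join_singleton, indent_eq l h]
    simp
  · exact PySem.Chars.join_singleton _ _

theorem join_append_ne_nil (sep : List Char) :
    ∀ (ys zs : List (List Char)), ys ≠ [] → zs ≠ [] →
    PySem.Chars.join sep (ys ++ zs) = PySem.Chars.join sep ys ++ sep ++ PySem.Chars.join sep zs := by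
  intro ys
  induction ys with
  | nil => intro zs h _; exact absurd rfl h
  | cons y ys ih =>
    intro zs _ hzs
    cases ys with
    | nil =>
      cases zs with
      | nil => exact absurd rfl hzs
      | cons z zs => rw [List.singleton_append, PySem.Chars.join_cons_cons, PySem.Chars.join_singleton]
    | cons y2 ys2 =>
      rw [List.cons_append, List.cons_append, PySem.Chars.join_cons_cons,
        ← List.cons_append, ih zs (by simp) hzs, PySem.Chars.join_cons_cons]
      simp

theorem flatMap_fA_ne_nil (l : List Char) (rest : List (List Char)) :
    (l :: rest).flatMap fA ≠ [] := by
  simp only [List.flatMap_cons]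
  intro hcon
  exact fA_ne_nil l (List.append_eq_nil_iff.mp hcon).1

theorem join_flatMap_eq_map : ∀ (lines : List (List Char)),
    (∀ l ∈ lines, '\n' ∉ l) →
    PySem.Chars.join ['\n'] (lines.flatMap fA) = PySem.Chars.join ['\n'] (lines.map altSub) := by
  intro lines
  induction lines with
  | nil => intro _; rfl
  | cons l rest ih =>
    intro hnl
    have hl : '\n' ∉ l := hnl l (by simp)
    have hrest : ∀ x ∈ rest, '\n' ∉ x := fun x hx => hnl x (by simp [hx])
    cases rest with
    | nil => simpa using join_fA l hl
    | cons r rs =>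
      rw [List.flatMap_cons,
        join_append_ne_nil ['\n'] (fA l) ((r :: rs).flatMap fA) (fA_ne_nil l)
          (flatMap_fA_ne_nil r rs),
        join_fA l hl, ih hrest]
      simp only [List.map_cons]
      rw [PySem.Chars.join_cons_cons]

-- the pieces produced by splitting on '\n' contain no '\n'.
theorem splitOn_go_no_nl : ∀ (fuel : Nat) (l cur : List Char) (acc : List (List Char)),
    l.length < fuel → (∀ p ∈ acc, '\n' ∉ p) → '\n' ∉ cur →
    ∀ p ∈ PySem.Chars.splitOn.go ['\n'] fuel l cur acc, '\n' ∉ p := by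
  intro fuel
  induction fuel with
  | zero => intro l cur acc hlt; omega
  | succ n ih =>
    intro l cur acc hlt hacc hcur
    cases l with
    | nil =>
      simp only [PySem.Chars.splitOn.go]
      intro p hp
      rw [List.mem_reverse, List.mem_cons] at hp
      rcases hp with hp | hp
      · subst hp; simpa using hcur
      · exact hacc p hp
    | cons c rest =>
      simp only [PySem.Chars.splitOn.go]
      by_cases hc : c = '\n'
      · subst hc
        rw [if_pos (by simp [List.isPrefixOf])]
        apply ih
        · simpa using Nat.lt_of_succ_lt_succ hlt
        · intro p hp
          rw [List.mem_cons] at hp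
          rcases hp with hp | hp
          · subst hp; simpa using hcur
          · exact hacc p hp
        · simp
      · rw [if_neg (by simp [List.isPrefixOf]; exact fun e => hc e.symm)]
        apply ih
        · simpa using Nat.lt_of_succ_lt_succ hlt
        · exact hacc
        · intro hmem
          rw [List.mem_cons] at hmem
          rcases hmem with hmem | hmem
          · exact hc hmem.symm
          · exact hcur hmem

theorem splitOn_nl_no_nl (s : List Char) :
    ∀ p ∈ PySem.Chars.splitOn s ['\n'], '\n' ∉ p := by
  unfold PySem.Chars.splitOn
  exact splitOn_go_no_nl (s.length + 1) s [] [] (by omega) (by simp) (by simp)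

-- ===== VERDICT (by name: the statement is the Claim_ definition above) =====
theorem add_pass_to_functions_py_spec : Claim_equal_add_pass_to_functions_py := by
  intro class_src _
  unfold Spec_add_pass_to_functions_py
  simp only [add_pass_to_functions_py, add_pass_to_functions_py_alt]
  rw [foldlA_eq_flatMap, List.nil_append,
    join_flatMap_eq_map _ (splitOn_nl_no_nl class_src.toList)]
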